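-- pv_equiv track=rewrite | github.com/shabov/APPM-3650 | HW9.py | teddy
-- ===== SOURCE A (Python) =====
-- def teddy_helper(profits, left, right, year, memo):
--     if left > right:
--         return 0
--     if memo[left][right][year] != -1:
--         return memo[left][right][year]
--
--     left_profit = profits[left] * year + teddy_helper(profits, left + 1, right, year + 1, memo)
--     right_profit = profits[right] * year + teddy_helper(profits, left, right - 1, year + 1, memo)
--
--     if left_profit > right_profit:
--         memo[left][right][year] = left_profit
--         return left_profit
--     else:
--         memo[left][right][year] = right_profit
--         return right_profit
--
-- def teddy(profits):
--     n = len(profits)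
--     memo = [[[-1] * (n + 1) for _ in range(n)] for _ in range(n)]
--     max_profit = teddy_helper(profits, 0, n - 1, 1, memo)
--
--     order = ''
--     left, right = 0, n - 1
--     year = 1
--
--     while left < right:
--         left_profit = profits[left] * year + memo[left + 1][right][year + 1]
--         right_profit = profits[right] * year + memo[left][right - 1][year + 1]
--         if left_profit >= right_profit:
--             order += 'L'
--             left += 1
--         else:
--             order += 'R'
--             right -= 1
--         year += 1
--
--     if left == right:
--         order += 'X'
--
--     return (order, max_profit)
-- ===== SOURCE B (Python) =====
-- def teddy(profits):
--     n = len(profits)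
--     # bottom-up interval DP: dp[(l, r)] = best profit for remaining subarray l..r,
--     # whose first pick happens in year n - (r - l + 1) + 1
--     dp = {}
--     for length in range(1, n + 1):
--         year = n - length + 1
--         for l in range(0, n - length + 1):
--             r = l + length - 1
--             lp = profits[l] * year + dp.get((l + 1, r), 0)
--             rp = profits[r] * year + dp.get((l, r - 1), 0)
--             dp[(l, r)] = lp if lp > rp else rp
--     order = ''
--     l, r = 0, n - 1
--     for year in range(1, n):
--         lp = profits[l] * year + dp.get((l + 1, r), 0)
--         rp = profits[r] * year + dp.get((l, r - 1), 0)
--         if lp >= rp: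
--             order += 'L'
--             l += 1
--         else:
--             order += 'R'
--             r -= 1
--     if n > 0:
--         order += 'X'
--     return (order, dp.get((0, n - 1), 0))
-- ===== Notes on version B (the rewrite author's own statement) =====
-- stated objective: faster
-- what changed: A's top-down recursion with an n*n*(n+1) memo table indexed by (left,right,year) is replaced by a bottom-up interval DP over a 2-index dict keyed by (left,right) only (the year is determined by the interval length), with the pick order reconstructed by a for-loop over the years instead of A's while-loop.
import Mathlib
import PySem

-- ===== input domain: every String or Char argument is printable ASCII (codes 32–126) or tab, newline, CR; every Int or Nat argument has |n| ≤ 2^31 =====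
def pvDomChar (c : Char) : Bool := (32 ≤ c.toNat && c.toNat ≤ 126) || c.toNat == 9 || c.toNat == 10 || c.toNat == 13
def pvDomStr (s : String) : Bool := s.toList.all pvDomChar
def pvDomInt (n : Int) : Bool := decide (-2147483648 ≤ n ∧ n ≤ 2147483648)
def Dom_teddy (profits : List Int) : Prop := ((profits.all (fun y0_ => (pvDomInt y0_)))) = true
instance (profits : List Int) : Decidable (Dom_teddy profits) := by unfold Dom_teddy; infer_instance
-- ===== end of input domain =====

-- B replaces A's O(n^3)-memory top-down 3-index memoised recursion by a bottom-up
-- 2-index interval DP (year is determined by the interval), a different algorithm.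

-- ===== PORT A =====

-- profits[i]; every access in both programs is with 0 ≤ i < len, where this is exact
def pvGetP (profits : List Int) (i : Int) : Int := (PySem.List.pyGet? profits i).getD 0

-- memo[l][r][y] read; -1 when out of range (Python would raise IndexError, unreachable:
-- all accesses are in range of the n×n×(n+1) table)
def memoGet (m : List (List (List Int))) (l r y : Int) : Int :=
  ((m[l.toNat]?.bind fun row => row[r.toNat]?.bind fun cell => cell[y.toNat]?).getD (-1))

-- memo[l][r][y] = v; no-op out of range (unreachable, as above; indices are nonnegative)
def memoSet (m : List (List (List Int))) (l r y v : Int) : List (List (List Int)) :=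
  m.modify l.toNat (fun row => row.modify r.toNat (fun cell => cell.set y.toNat v))

def teddyHelper (profits : List Int) (left right year : Int)
    (memo : List (List (List Int))) : Int × List (List (List Int)) :=
  if _h1 : left > right then (0, memo)
  else if memoGet memo left right year ≠ -1 then (memoGet memo left right year, memo)
  else
    let p1 := teddyHelper profits (left + 1) right (year + 1) memo
    let left_profit := pvGetP profits left * year + p1.1
    let p2 := teddyHelper profits left (right - 1) (year + 1) p1.2
    let right_profit := pvGetP profits right * year + p2.1
    if left_profit > right_profit then (left_profit, memoSet p2.2 left right year left_profit)
    else (right_profit, memoSet p2.2 left right year right_profit)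
termination_by (right + 1 - left).toNat
decreasing_by all_goals omega

-- the 'while left < right' reconstruction loop; returns (order, left, right)
def teddyLoop (profits : List Int) (memo : List (List (List Int)))
    (left right year : Int) (order : String) : String × Int × Int :=
  if _h : left < right then
    let left_profit := pvGetP profits left * year + memoGet memo (left + 1) right (year + 1)
    let right_profit := pvGetP profits right * year + memoGet memo left (right - 1) (year + 1)
    if left_profit ≥ right_profit then
      teddyLoop profits memo (left + 1) right (year + 1) (order ++ "L")
    else
      teddyLoop profits memo left (right - 1) (year + 1) (order ++ "R")
  else (order, left, right)
termination_by (right - left).toNat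
decreasing_by all_goals omega

def teddy (profits : List Int) : String × Int :=
  let n : Int := profits.length
  let memo : List (List (List Int)) :=
    List.replicate profits.length (List.replicate profits.length
      (List.replicate (profits.length + 1) (-1)))
  let res := teddyHelper profits 0 (n - 1) 1 memo
  let t := teddyLoop profits res.2 0 (n - 1) 1 ""
  let order := if t.2.1 = t.2.2 then t.1 ++ "X" else t.1
  (order, res.1)

-- ===== PORT B =====

-- the bottom-up interval DP table: dp[(l,r)] = best profit from subarray l..r
def dpBuild (profits : List Int) : PySem.Dict (Int × Int) Int :=
  let n : Int := profits.length
  (PySem.List.pyRange 1 (n + 1) 1).foldl (fun dp len =>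
    let year := n - len + 1
    (PySem.List.pyRange 0 (n - len + 1) 1).foldl (fun dp l =>
      let r := l + len - 1
      let lp := pvGetP profits l * year + dp.getD (l + 1, r) 0
      let rp := pvGetP profits r * year + dp.getD (l, r - 1) 0
      dp.insert (l, r) (if lp > rp then lp else rp)) dp) PySem.Dict.empty

-- one step of B's 'for year in range(1, n)' reconstruction loop, state (order, l, r)
def bStep (profits : List Int) (dp : PySem.Dict (Int × Int) Int)
    (st : String × Int × Int) (year : Int) : String × Int × Int :=
  let l := st.2.1
  let r := st.2.2
  let lp := pvGetP profits l * year + dp.getD (l + 1, r) 0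
  let rp := pvGetP profits r * year + dp.getD (l, r - 1) 0
  if lp ≥ rp then (st.1 ++ "L", l + 1, r) else (st.1 ++ "R", l, r - 1)

def teddy_alt (profits : List Int) : String × Int :=
  let n : Int := profits.length
  let dp := dpBuild profits
  let t := (PySem.List.pyRange 1 n 1).foldl (bStep profits dp) ("", 0, n - 1)
  let order := if n > 0 then t.1 ++ "X" else t.1
  (order, dp.getD (0, n - 1) 0)

-- ===== PRECONDITION & SPEC =====
def Spec_teddy (profits : List Int) (out : String × Int) : Prop := out = teddy_alt profits
instance (profits : List Int) (out : String × Int) : Decidable (Spec_teddy profits out) := by unfold Spec_teddy; infer_instance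

-- ===== CLAIM (what is proved, stated in full; the proofs are below) =====
def Claim_equal_teddy : Prop := ∀ (profits : List Int), Dom_teddy profits → Spec_teddy profits (teddy profits)

-- ===== LEMMAS AND PROOFS =====

-- the common specification: best total profit for the remaining subarray l..r
-- (its first pick happens in year n - (r-l+1) + 1 = n + l - r)
def gSpec (profits : List Int) (l r : Int) : Int :=
  if _h : l > r then 0
  else
    let y := (profits.length : Int) + l - r
    let lp := pvGetP profits l * y + gSpec profits (l + 1) r
    let rp := pvGetP profits r * y + gSpec profits l (r - 1)
    if lp > rp then lp else rp
termination_by (r + 1 - l).toNat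
decreasing_by all_goals omega

-- shape of the memo table: an n × n × (n+1) rectangle
def MShape (m : List (List (List Int))) (n : Nat) : Prop :=
  m.length = n ∧ ∀ (i : Nat) (row : List (List Int)), m[i]? = some row → row.length = n ∧
    ∀ (j : Nat) (cell : List Int), row[j]? = some cell → cell.length = n + 1

-- every consistent-year entry of the sub-triangle l..r is filled with its gSpec value
def MFilled (profits : List Int) (m : List (List (List Int))) (l r : Int) : Prop :=
  ∀ a b : Int, l ≤ a → a ≤ b → b ≤ r →
    memoGet m a b ((profits.length : Int) + a - b) = gSpec profits a b

-- memo soundness invariant: a non-(-1) consistent entry means its whole sub-triangle is filled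
def MInv (profits : List Int) (m : List (List (List Int))) : Prop :=
  ∀ a b : Int, 0 ≤ a → a ≤ b → b ≤ (profits.length : Int) - 1 →
    memoGet m a b ((profits.length : Int) + a - b) ≠ -1 → MFilled profits m a b

-- all writes between m and m' were correct values at consistent entries
def MGood (profits : List Int) (m m' : List (List (List Int))) : Prop :=
  ∀ a b : Int, 0 ≤ a → a ≤ b → b ≤ (profits.length : Int) - 1 →
    memoGet m' a b ((profits.length : Int) + a - b) = memoGet m a b ((profits.length : Int) + a - b) ∨
    memoGet m' a b ((profits.length : Int) + a - b) = gSpec profits a b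

lemma memoGet_memoSet_self {m : List (List (List Int))} {n : Nat} (hsh : MShape m n)
    {l r y : Int} (v : Int) (hl0 : 0 ≤ l) (hl : l < (n : Int)) (hr0 : 0 ≤ r) (hr : r < (n : Int))
    (hy0 : 0 ≤ y) (hy : y ≤ (n : Int)) :
    memoGet (memoSet m l r y v) l r y = v := by
  obtain ⟨hlen, hrows⟩ := hsh
  have hl' : l.toNat < m.length := by omega
  have hrow : m[l.toNat]? = some m[l.toNat] := by simp [hl']
  obtain ⟨hrlen, hcells⟩ := hrows _ _ hrow
  have hr' : r.toNat < m[l.toNat].length := by omega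
  have hcell : m[l.toNat][r.toNat]? = some m[l.toNat][r.toNat] := by simp [hr']
  have hclen := hcells _ _ hcell
  simp [memoGet, memoSet, List.getElem?_modify, hrow, hcell,
    List.getElem?_set_self (show y.toNat < m[l.toNat][r.toNat].length by omega)]

lemma memoGet_memoSet_ne {m : List (List (List Int))} {l r y v a b c : Int}
    (hl0 : 0 ≤ l) (hr0 : 0 ≤ r) (hy0 : 0 ≤ y) (ha0 : 0 ≤ a) (hb0 : 0 ≤ b) (hc0 : 0 ≤ c)
    (hne : a ≠ l ∨ b ≠ r ∨ c ≠ y) :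
    memoGet (memoSet m l r y v) a b c = memoGet m a b c := by
  simp only [memoGet, memoSet, List.getElem?_modify]
  rcases hne with h | h | h
  · have h' : ¬ l.toNat = a.toNat := by omega
    simp [h']
  · have h' : ¬ r.toNat = b.toNat := by omega
    by_cases hla : l.toNat = a.toNat <;>
      cases hma : m[a.toNat]? <;>
        simp [hla, List.getElem?_modify, h']
  · have h' : ¬ y.toNat = c.toNat := by omega
    by_cases hla : l.toNat = a.toNat <;>
      by_cases hrb : r.toNat = b.toNat <;>
        cases hma : m[a.toNat]? <;>
          simp [hla, hrb, List.getElem?_modify] <;>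
            rename_i row <;> cases hrowb : row[b.toNat]? <;>
              simp [List.getElem?_set_ne (show y.toNat ≠ c.toNat from h')]

lemma MShape_memoSet {m : List (List (List Int))} {n : Nat} (hsh : MShape m n) (l r y v : Int) :
    MShape (memoSet m l r y v) n := by
  obtain ⟨hlen, hrows⟩ := hsh
  refine ⟨by simp [memoSet, hlen], ?_⟩
  intro i row hrow
  simp only [memoSet, List.getElem?_modify] at hrow
  cases hmi : m[i]? with
  | none => rw [hmi] at hrow; simp at hrow
  | some row0 =>
    rw [hmi] at hrow
    obtain ⟨hr0len, hcells0⟩ := hrows _ _ hmi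
    simp only [Option.map_eq_map, Option.map_some, Option.some.injEq] at hrow
    by_cases hil : l.toNat = i
    · rw [if_pos hil] at hrow
      subst hrow
      refine ⟨by simp [hr0len], ?_⟩
      intro j cell hcell
      simp only [List.getElem?_modify] at hcell
      cases hrj : row0[j]? with
      | none => rw [hrj] at hcell; simp at hcell
      | some cell0 =>
        rw [hrj] at hcell
        have hc0len := hcells0 _ _ hrj
        simp only [Option.map_eq_map, Option.map_some, Option.some.injEq] at hcell
        by_cases hjr : r.toNat = j
        · rw [if_pos hjr] at hcell
          subst hcell
          simp [hc0len]
        · rw [if_neg hjr] at hcell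
          subst hcell
          exact hc0len
    · rw [if_neg hil] at hrow
      subst hrow
      exact hrows _ _ hmi

lemma memoGet_init (n : Nat) (a b c : Int) :
    memoGet (List.replicate n (List.replicate n (List.replicate (n + 1) (-1)))) a b c = -1 := by
  simp only [memoGet, List.getElem?_replicate]
  split_ifs <;>
    simp only [List.getElem?_replicate, Option.bind_some, Option.bind_none, Option.getD_none] <;>
      split_ifs <;> simp

lemma MShape_init (n : Nat) :
    MShape (List.replicate n (List.replicate n (List.replicate (n + 1) (-1)))) n := by
  refine ⟨by simp, ?_⟩
  intro i row hrow
  rw [List.getElem?_replicate] at hrow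
  split_ifs at hrow
  cases hrow
  refine ⟨by simp, ?_⟩
  intro j cell hcell
  rw [List.getElem?_replicate] at hcell
  split_ifs at hcell
  cases hcell
  simp

lemma MGood_trans {profits : List Int} {m1 m2 m3 : List (List (List Int))}
    (h12 : MGood profits m1 m2) (h23 : MGood profits m2 m3) : MGood profits m1 m3 := by
  intro a b ha hab hb
  rcases h23 a b ha hab hb with h | h
  · rw [h]; exact h12 a b ha hab hb
  · exact Or.inr h

lemma MFilled_mono {profits : List Int} {m m' : List (List (List Int))} {l r : Int}
    (hf : MFilled profits m l r) (hg : MGood profits m m') (hl : 0 ≤ l)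
    (hr : r ≤ (profits.length : Int) - 1) : MFilled profits m' l r := by
  intro a b hla hab hbr
  rcases hg a b (by omega) hab (by omega) with h | h
  · rw [h]; exact hf a b hla hab hbr
  · exact h

lemma MGood_memoSet {profits : List Int} {m : List (List (List Int))} {l r : Int}
    (hsh : MShape m profits.length) (hl : 0 ≤ l) (hlr : l ≤ r)
    (hr : r ≤ (profits.length : Int) - 1) :
    MGood profits m (memoSet m l r ((profits.length : Int) + l - r) (gSpec profits l r)) := by
  intro a b ha hab hb
  by_cases he : a = l ∧ b = r
  · right
    obtain ⟨rfl, rfl⟩ := he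
    exact memoGet_memoSet_self hsh _ hl (by omega) (by omega) (by omega) (by omega) (by omega)
  · left
    have hne : a ≠ l ∨ b ≠ r ∨ ((profits.length : Int) + a - b) ≠ ((profits.length : Int) + l - r) := by
      by_cases h1 : a = l
      · exact Or.inr (Or.inl (fun h2 => he ⟨h1, h2⟩))
      · exact Or.inl h1
    exact memoGet_memoSet_ne hl (by omega) (by omega) ha (by omega) (by omega) hne

lemma helper_main (profits : List Int) :
    ∀ (k : Nat) (l r y : Int) (m : List (List (List Int))),
      (r + 1 - l).toNat ≤ k → 0 ≤ l → r ≤ (profits.length : Int) - 1 →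
      y = (profits.length : Int) + l - r →
      MShape m profits.length → MInv profits m →
      (teddyHelper profits l r y m).1 = gSpec profits l r ∧
      MShape (teddyHelper profits l r y m).2 profits.length ∧
      MInv profits (teddyHelper profits l r y m).2 ∧
      (l ≤ r → MFilled profits (teddyHelper profits l r y m).2 l r) ∧
      MGood profits m (teddyHelper profits l r y m).2 := by
  intro k
  induction k with
  | zero =>
    intro l r y m hk hl hr hy hsh hinv
    have hlr : l > r := by omega
    rw [teddyHelper, dif_pos hlr, gSpec, dif_pos hlr]
    exact ⟨rfl, hsh, hinv, fun h => absurd h (by omega), fun a b ha hab hb => Or.inl rfl⟩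
  | succ k ih =>
    intro l r y m hk hl hr hy hsh hinv
    by_cases hlr : l > r
    · rw [teddyHelper, dif_pos hlr, gSpec, dif_pos hlr]
      exact ⟨rfl, hsh, hinv, fun h => absurd h (by omega), fun a b ha hab hb => Or.inl rfl⟩
    · rw [teddyHelper, dif_neg hlr]
      by_cases hhit : memoGet m l r y ≠ -1
      · rw [if_pos hhit]
        have hfill : MFilled profits m l r := hinv l r hl (by omega) hr (hy ▸ hhit)
        refine ⟨?_, hsh, hinv, fun _ => hfill, fun a b ha hab hb => Or.inl rfl⟩
        have hv := hfill l r le_rfl (by omega) le_rfl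
        rw [← hy] at hv
        exact hv
      · rw [if_neg hhit]
        obtain ⟨A1, S1, I1, F1, G1⟩ :=
          ih (l + 1) r (y + 1) m (by omega) (by omega) hr (by omega) hsh hinv
        obtain ⟨A2, S2, I2, F2, G2⟩ :=
          ih l (r - 1) (y + 1) (teddyHelper profits (l + 1) r (y + 1) m).2
            (by omega) hl (by omega) (by omega) S1 I1
        dsimp only
        set t1 := teddyHelper profits (l + 1) r (y + 1) m with ht1
        set t2 := teddyHelper profits l (r - 1) (y + 1) t1.2 with ht2
        set lp := pvGetP profits l * y + t1.1 with hlp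
        set rp := pvGetP profits r * y + t2.1 with hrp
        have hg : gSpec profits l r = if lp > rp then lp else rp := by
          rw [gSpec, dif_neg hlr]
          dsimp only
          rw [← A1, ← A2, ← hy]
        have key : ∀ v : Int, v = gSpec profits l r →
            v = gSpec profits l r ∧ MShape (memoSet t2.2 l r y v) profits.length ∧
            MInv profits (memoSet t2.2 l r y v) ∧
            (l ≤ r → MFilled profits (memoSet t2.2 l r y v) l r) ∧
            MGood profits m (memoSet t2.2 l r y v) := by
          intro v hvg
          have hGset : MGood profits t2.2 (memoSet t2.2 l r y v) := by
            rw [hvg, hy]; exact MGood_memoSet S2 hl (by omega) hr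
          have hF : MFilled profits (memoSet t2.2 l r y v) l r := by
            intro a b hla hab hbr
            by_cases he : a = l ∧ b = r
            · obtain ⟨rfl, rfl⟩ := he
              rw [← hy, memoGet_memoSet_self S2 v hl (by omega) (by omega) (by omega)
                (by omega) (by omega)]
              exact hvg
            · by_cases ha1 : a = l
              · have hbne : b ≠ r := fun hh => he ⟨ha1, hh⟩
                rw [memoGet_memoSet_ne hl (by omega) (by omega) (by omega) (by omega)
                  (by omega) (Or.inr (Or.inl hbne))]
                exact F2 (by omega) a b (by omega) hab (by omega)
              · rw [memoGet_memoSet_ne hl (by omega) (by omega) (by omega) (by omega)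
                  (by omega) (Or.inl ha1)]
                exact MFilled_mono (F1 (by omega)) G2 (by omega) hr a b (by omega) hab hbr
          have hI : MInv profits (memoSet t2.2 l r y v) := by
            intro a b ha hab hb hne
            by_cases he : a = l ∧ b = r
            · obtain ⟨rfl, rfl⟩ := he; exact hF
            · have hne' : a ≠ l ∨ b ≠ r ∨ ((profits.length : Int) + a - b) ≠ y := by
                by_cases h1 : a = l
                · exact Or.inr (Or.inl (fun h2 => he ⟨h1, h2⟩))
                · exact Or.inl h1
              rw [memoGet_memoSet_ne hl (by omega) (by omega) ha (by omega) (by omega)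
                hne'] at hne
              exact MFilled_mono (I2 a b ha hab hb hne) hGset ha hb
          exact ⟨hvg, MShape_memoSet S2 l r y v, hI, fun _ => hF,
            MGood_trans G1 (MGood_trans G2 hGset)⟩
        by_cases hcmp : lp > rp
        · rw [if_pos hcmp] at hg ⊢
          exact key lp hg.symm
        · rw [if_neg hcmp] at hg ⊢
          exact key rp hg.symm

-- generic invariant rule for a fold over range(a, b)
lemma foldl_pyRange_inv {σ : Type} (P : Int → σ → Prop) (f : σ → Int → σ) :
    ∀ (k : Nat) (a b : Int) (s : σ), (b - a).toNat ≤ k → a ≤ b → P a s →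
      (∀ x t, a ≤ x → x < b → P x t → P (x + 1) (f t x)) →
      P b ((PySem.List.pyRange a b 1).foldl f s) := by
  intro k
  induction k with
  | zero =>
    intro a b s hk hab h0 _
    have hab' : a = b := by omega
    subst hab'
    rw [PySem.List.pyRange_one_eq_nil le_rfl]
    exact h0
  | succ k ih =>
    intro a b s hk hab h0 hstep
    by_cases hab' : a = b
    · subst hab'
      rw [PySem.List.pyRange_one_eq_nil le_rfl]
      exact h0
    · rw [PySem.List.pyRange_one_cons (by omega)]
      rw [List.foldl_cons]
      exact ih (a + 1) b (f s a) (by omega) (by omega)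
        (hstep a s le_rfl (by omega) h0) (fun x t hx hx' => hstep x t (by omega) hx')

-- invariant of B's DP table: keys are the processed intervals, values their gSpec
def DPInv (profits : List Int) (dp : PySem.Dict (Int × Int) Int)
    (cond : Int → Int → Prop) : Prop :=
  (∀ p : Int × Int, dp.get? p ≠ none →
    0 ≤ p.1 ∧ p.1 ≤ p.2 ∧ p.2 ≤ (profits.length : Int) - 1 ∧ cond p.1 p.2) ∧
  (∀ a b : Int, 0 ≤ a → b ≤ (profits.length : Int) - 1 → (a > b ∨ cond a b) →
    dp.getD (a, b) 0 = gSpec profits a b)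

lemma dpBuild_correct (profits : List Int) :
    ∀ a b : Int, 0 ≤ a → b ≤ (profits.length : Int) - 1 →
      (dpBuild profits).getD (a, b) 0 = gSpec profits a b := by
  suffices h : DPInv profits (dpBuild profits)
      (fun a b => b - a + 1 ≤ ((profits.length : Int) + 1) - 1) by
    intro a b ha hb
    exact h.2 a b ha hb (by omega)
  have hinit : DPInv profits PySem.Dict.empty (fun a b => b - a + 1 ≤ (1 : Int) - 1) := by
    constructor
    · intro p hp
      exact absurd (PySem.Dict.get?_empty _) hp
    · intro a b ha hb hc
      rw [PySem.Dict.getD_empty, gSpec, dif_pos (by omega : a > b)]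
  rw [dpBuild]
  refine foldl_pyRange_inv
    (P := fun L dp => DPInv profits dp (fun a b => b - a + 1 ≤ L - 1))
    _ ((((profits.length : Int) + 1) - 1).toNat) 1 ((profits.length : Int) + 1)
    PySem.Dict.empty le_rfl (by omega) hinit ?_
  intro len dp hlen1 hlen2 hP
  dsimp only
  have hstep2 : ∀ x t, 0 ≤ x → x < (profits.length : Int) - len + 1 →
      DPInv profits t (fun a b => b - a + 1 ≤ len - 1 ∨ (b - a + 1 = len ∧ a < x)) →
      DPInv profits
        (t.insert (x, x + len - 1)
          (if pvGetP profits x * ((profits.length : Int) - len + 1) + t.getD (x + 1, x + len - 1) 0 >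
              pvGetP profits (x + len - 1) * ((profits.length : Int) - len + 1) + t.getD (x, x + len - 1 - 1) 0
            then pvGetP profits x * ((profits.length : Int) - len + 1) + t.getD (x + 1, x + len - 1) 0
            else pvGetP profits (x + len - 1) * ((profits.length : Int) - len + 1) + t.getD (x, x + len - 1 - 1) 0))
        (fun a b => b - a + 1 ≤ len - 1 ∨ (b - a + 1 = len ∧ a < x + 1)) := by
    intro x t hx0 hxlt ⟨D1, D2⟩
    have hread1 : t.getD (x + 1, x + len - 1) 0 = gSpec profits (x + 1) (x + len - 1) :=
      D2 (x + 1) (x + len - 1) (by omega) (by omega) (by omega)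
    have hread2 : t.getD (x, x + len - 1 - 1) 0 = gSpec profits x (x + len - 1 - 1) :=
      D2 x (x + len - 1 - 1) (by omega) (by omega) (by omega)
    have hvg : (if pvGetP profits x * ((profits.length : Int) - len + 1) + t.getD (x + 1, x + len - 1) 0 >
              pvGetP profits (x + len - 1) * ((profits.length : Int) - len + 1) + t.getD (x, x + len - 1 - 1) 0
            then pvGetP profits x * ((profits.length : Int) - len + 1) + t.getD (x + 1, x + len - 1) 0
            else pvGetP profits (x + len - 1) * ((profits.length : Int) - len + 1) + t.getD (x, x + len - 1 - 1) 0)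
        = gSpec profits x (x + len - 1) := by
      conv_rhs => rw [gSpec]
      rw [dif_neg (by omega : ¬ x > x + len - 1)]
      dsimp only
      rw [show (profits.length : Int) + x - (x + len - 1) = (profits.length : Int) - len + 1 from by
        omega, hread1, hread2]
    constructor
    · intro p hp
      rw [PySem.Dict.get?_insert] at hp
      by_cases hpk : p = (x, x + len - 1)
      · subst hpk
        exact ⟨hx0, by omega, by omega, Or.inr ⟨by omega, by omega⟩⟩
      · rw [if_neg hpk] at hp
        obtain ⟨h1, h2, h3, h4⟩ := D1 p hp
        exact ⟨h1, h2, h3, by omega⟩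
    · intro a b ha hb hc
      rw [PySem.Dict.getD_insert]
      by_cases hpk : (a, b) = (x, x + len - 1)
      · rw [if_pos hpk]
        have ha' : a = x := congrArg Prod.fst hpk
        have hb' : b = x + len - 1 := congrArg Prod.snd hpk
        subst ha'; subst hb'
        exact hvg
      · rw [if_neg hpk]
        have hne : a ≠ x ∨ b ≠ x + len - 1 := by
          by_cases h1 : a = x
          · exact Or.inr (fun h2 => hpk (by rw [h1, h2]))
          · exact Or.inl h1
        exact D2 a b ha hb (by omega)
  constructor
  · intro p hp
    have := (foldl_pyRange_inv
      (P := fun L0 t => DPInv profits t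
        (fun a b => b - a + 1 ≤ len - 1 ∨ (b - a + 1 = len ∧ a < L0)))
      _ (((profits.length : Int) - len + 1).toNat) 0 ((profits.length : Int) - len + 1)
      dp (by omega) (by omega)
      ⟨fun p hp => by obtain ⟨h1, h2, h3, h4⟩ := hP.1 p hp; exact ⟨h1, h2, h3, by omega⟩,
       fun a b ha hb hc => hP.2 a b ha hb (by omega)⟩ hstep2).1 p hp
    obtain ⟨h1, h2, h3, h4⟩ := this
    exact ⟨h1, h2, h3, by omega⟩
  · intro a b ha hb hc
    exact (foldl_pyRange_inv
      (P := fun L0 t => DPInv profits t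
        (fun a b => b - a + 1 ≤ len - 1 ∨ (b - a + 1 = len ∧ a < L0)))
      _ (((profits.length : Int) - len + 1).toNat) 0 ((profits.length : Int) - len + 1)
      dp (by omega) (by omega)
      ⟨fun p hp => by obtain ⟨h1, h2, h3, h4⟩ := hP.1 p hp; exact ⟨h1, h2, h3, by omega⟩,
       fun a b ha hb hc => hP.2 a b ha hb (by omega)⟩ hstep2).2 a b ha hb (by omega)

-- the two reconstruction loops walk the same path and build the same string
lemma loopAgree (profits : List Int) (memo : List (List (List Int)))
    (dp : PySem.Dict (Int × Int) Int)
    (HA : ∀ a b : Int, 0 ≤ a → a ≤ b → b ≤ (profits.length : Int) - 1 →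
      memoGet memo a b ((profits.length : Int) + a - b) = gSpec profits a b)
    (HB : ∀ a b : Int, 0 ≤ a → b ≤ (profits.length : Int) - 1 →
      dp.getD (a, b) 0 = gSpec profits a b) :
    ∀ (k : Nat) (l r y : Int) (acc : String), (r - l).toNat ≤ k → 0 ≤ l →
      r ≤ (profits.length : Int) - 1 → l ≤ r → y = (profits.length : Int) + l - r →
      teddyLoop profits memo l r y acc =
        (PySem.List.pyRange y (profits.length : Int) 1).foldl (bStep profits dp) (acc, l, r) ∧
      (teddyLoop profits memo l r y acc).2.1 = (teddyLoop profits memo l r y acc).2.2 := by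
  intro k
  induction k with
  | zero =>
    intro l r y acc hk hl hr hlr hy
    have hlr' : l = r := by omega
    rw [teddyLoop, dif_neg (by omega : ¬ l < r), PySem.List.pyRange_one_eq_nil (by omega)]
    exact ⟨rfl, by omega⟩
  | succ k ih =>
    intro l r y acc hk hl hr hlr hy
    by_cases hlr' : l = r
    · rw [teddyLoop, dif_neg (by omega : ¬ l < r), PySem.List.pyRange_one_eq_nil (by omega)]
      exact ⟨rfl, by omega⟩
    · have hA1 : memoGet memo (l + 1) r (y + 1) = gSpec profits (l + 1) r := by
        have := HA (l + 1) r (by omega) (by omega) hr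
        rw [show (profits.length : Int) + (l + 1) - r = y + 1 from by omega] at this
        exact this
      have hA2 : memoGet memo l (r - 1) (y + 1) = gSpec profits l (r - 1) := by
        have := HA l (r - 1) hl (by omega) (by omega)
        rw [show (profits.length : Int) + l - (r - 1) = y + 1 from by omega] at this
        exact this
      rw [teddyLoop, dif_pos (by omega : l < r)]
      dsimp only
      rw [hA1, hA2, PySem.List.pyRange_one_cons (show y < (profits.length : Int) from by omega),
        List.foldl_cons, bStep]
      dsimp only
      rw [HB (l + 1) r (by omega) hr, HB l (r - 1) hl (by omega)]
      by_cases hc : pvGetP profits l * y + gSpec profits (l + 1) r ≥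
          pvGetP profits r * y + gSpec profits l (r - 1)
      · rw [if_pos hc, if_pos hc]
        exact ih (l + 1) r (y + 1) (acc ++ "L") (by omega) (by omega) hr (by omega) (by omega)
      · rw [if_neg hc, if_neg hc]
        exact ih l (r - 1) (y + 1) (acc ++ "R") (by omega) hl (by omega) (by omega) (by omega)

-- ===== VERDICT (by name: the statement is the Claim_ definition above) =====
theorem teddy_spec : Claim_equal_teddy := by
  intro profits _hdom
  show teddy profits = teddy_alt profits
  by_cases hn : profits = []
  · subst hn
    show teddy [] = teddy_alt []
    rw [teddy, teddy_alt, teddyHelper, teddyLoop]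
    norm_num [dpBuild, PySem.List.pyRange_one_eq_nil, PySem.Dict.getD_empty]
  · have hnp : 1 ≤ (profits.length : Int) := by
      have : profits.length ≠ 0 := fun h => hn (List.eq_nil_of_length_eq_zero h)
      omega
    obtain ⟨A0, S0, I0, F0, G0⟩ := helper_main profits
      ((((profits.length : Int) - 1) + 1 - 0).toNat) 0 ((profits.length : Int) - 1) 1
      (List.replicate profits.length (List.replicate profits.length
        (List.replicate (profits.length + 1) (-1))))
      le_rfl le_rfl (by omega) (by omega) (MShape_init _)
      (fun a b _ _ _ h => absurd (memoGet_init _ _ _ _) h)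
    have HB := dpBuild_correct profits
    obtain ⟨L1, L2⟩ := loopAgree profits
      (teddyHelper profits 0 ((profits.length : Int) - 1) 1
        (List.replicate profits.length (List.replicate profits.length
          (List.replicate (profits.length + 1) (-1))))).2
      (dpBuild profits) (F0 (by omega)) (fun a b ha hb => HB a b ha hb)
      (((profits.length : Int) - 1 - 0).toNat) 0 ((profits.length : Int) - 1) 1 ""
      le_rfl le_rfl le_rfl (by omega) (by omega)
    rw [teddy, teddy_alt]
    rw [if_pos L2, if_pos (show (profits.length : Int) > 0 from by omega), L1,
      Prod.mk.injEq]
    exact ⟨rfl, by rw [A0, HB 0 ((profits.length : Int) - 1) le_rfl le_rfl]⟩
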